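-- pv_equiv track=rewrite | github.com/gyrogovernance/science | experiments/cgm_byte_formalism_analysis.py | expand_intron_to_mask_a12
-- ===== SOURCE A (Python) =====
-- from typing import Dict, Any, Tuple
--
-- def expand_intron_to_mask_a12(intron: int) -> Tuple[int, int]:
--     """
--     Faithful implementation of Byte_Boundaries_Reference physics.
--
--     Structure:
--     - Bits 0, 7: L0 anchors (define 4 families - spinorial gyration phase)
--     - Bits 1-6: Payload (6 DoF pairs - transformation content)
--
--     Returns: (mask12, family_idx)
--     - mask12: 12-bit mask with 64 unique values (6 payload bits -> 6 pairs)
--     - family_idx: 0-3 (spinorial phase, controls gyration)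
--
--     Each payload bit flips one pair (both bits in the pair).
--     Family does NOT modify the mask; it controls gyration phase.
--     """
--     # Extract 6 payload bits (positions 1-6)
--     payload = (intron >> 1) & 0x3F
--
--     # Build 12-bit mask: each payload bit i flips pair i
--     # Pair i occupies bits (2*i, 2*i+1)
--     mask12 = 0
--     for i in range(6):
--         if (payload >> i) & 1:
--             mask12 |= (0b11 << (2 * i))
--
--     # Extract family index from L0 bits (0 and 7)
--     # bit0 -> position 0, bit7 -> position 1
--     family_idx = (intron & 1) | ((intron >> 6) & 2)
--
--     return mask12, family_idx
-- ===== SOURCE B (Python) =====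
-- def expand_intron_to_mask_a12(intron: int):
--     # Closed-form bit spread: no loop, no per-bit branch.
--     payload = (intron >> 1) & 0x3F
--     x = (payload | (payload << 3)) & 0b111000111      # bits 3-5 -> 6-8
--     x = (x | (x << 2)) & 0b10011010011                # bit 2 -> 4, bit 8 -> 10
--     x = (x | (x << 1)) & 0b10101010101                # bit 1 -> 2, bit 7 -> 8
--     mask12 = x * 3                                    # duplicate each bit into its pair
--     family_idx = (intron & 1) | ((intron >> 6) & 2)
--     return mask12, family_idx
-- ===== Notes on version B (the rewrite author's own statement) =====
-- stated objective: idiomatic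
-- what changed: Replaces A's per-bit test-and-OR loop with a closed-form mask/shift bit-spread (interleave the six payload bits into even positions in three shift steps, then multiply by three to fill each pair) — no loop and no branch.
import Mathlib
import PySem

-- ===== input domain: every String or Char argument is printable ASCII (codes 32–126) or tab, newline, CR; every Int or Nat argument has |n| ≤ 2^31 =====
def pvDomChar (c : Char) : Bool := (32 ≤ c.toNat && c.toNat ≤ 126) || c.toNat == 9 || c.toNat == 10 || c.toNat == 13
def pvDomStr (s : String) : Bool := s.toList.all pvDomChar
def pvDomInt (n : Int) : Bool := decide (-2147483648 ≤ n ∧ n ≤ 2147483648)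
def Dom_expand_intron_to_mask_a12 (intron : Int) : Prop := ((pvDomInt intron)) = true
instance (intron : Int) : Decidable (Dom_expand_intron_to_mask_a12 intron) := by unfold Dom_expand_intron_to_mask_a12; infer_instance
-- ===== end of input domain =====

-- B replaces A's 6-iteration bit-test loop by a closed-form mask/shift bit spread (no loop, no branch).

-- ===== PORT A =====
-- A: extract payload, then a 6-iteration loop OR-ing pair masks for set payload bits.
def expand_intron_to_mask_a12 (intron : Int) : Int × Int :=
  let payload := PySem.Int.band (intron >>> 1) 0x3F
  let mask12 := (PySem.List.pyRange 0 6 1).foldl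
    (fun m i =>
      if PySem.Int.band (payload >>> i.toNat) 1 ≠ 0 then
        PySem.Int.bor m (0b11 <<< (2 * i).toNat)
      else m) 0
  let family_idx := PySem.Int.bor (PySem.Int.band intron 1) (PySem.Int.band (intron >>> 6) 2)
  (mask12, family_idx)

-- ===== PORT B =====
-- B: closed-form bit spread of the 6 payload bits into even positions, then *3 to fill pairs.
def expand_intron_to_mask_a12_alt (intron : Int) : Int × Int :=
  let payload := PySem.Int.band (intron >>> 1) 0x3F
  let x1 := PySem.Int.band (PySem.Int.bor payload (payload <<< 3)) 0b111000111
  let x2 := PySem.Int.band (PySem.Int.bor x1 (x1 <<< 2)) 0b10011010011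
  let x3 := PySem.Int.band (PySem.Int.bor x2 (x2 <<< 1)) 0b10101010101
  let mask12 := x3 * 3
  let family_idx := PySem.Int.bor (PySem.Int.band intron 1) (PySem.Int.band (intron >>> 6) 2)
  (mask12, family_idx)

-- ===== PRECONDITION & SPEC =====
def Spec_expand_intron_to_mask_a12 (intron : Int) (out : Int × Int) : Prop := out = expand_intron_to_mask_a12_alt intron
instance (intron : Int) (out : Int × Int) : Decidable (Spec_expand_intron_to_mask_a12 intron out) := by unfold Spec_expand_intron_to_mask_a12; infer_instance

-- ===== CLAIM (what is proved, stated in full; the proofs are below) =====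
def Claim_equal_expand_intron_to_mask_a12 : Prop := ∀ (intron : Int), Dom_expand_intron_to_mask_a12 intron → Spec_expand_intron_to_mask_a12 intron (expand_intron_to_mask_a12 intron)

-- ===== LEMMAS AND PROOFS =====

-- A's mask computation as a function of the payload
def pvLoopMask (payload : Int) : Int :=
  (PySem.List.pyRange 0 6 1).foldl
    (fun m i =>
      if PySem.Int.band (payload >>> i.toNat) 1 ≠ 0 then
        PySem.Int.bor m (0b11 <<< (2 * i).toNat)
      else m) 0

-- B's mask computation as a function of the payload
def pvSpreadMask (payload : Int) : Int :=
  let x1 := PySem.Int.band (PySem.Int.bor payload (payload <<< 3)) 0b111000111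
  let x2 := PySem.Int.band (PySem.Int.bor x1 (x1 <<< 2)) 0b10011010011
  let x3 := PySem.Int.band (PySem.Int.bor x2 (x2 <<< 1)) 0b10101010101
  x3 * 3

-- band with 63 always lands in [0, 64)
theorem pv_band63_bounds (a : Int) : 0 ≤ PySem.Int.band a 63 ∧ PySem.Int.band a 63 < 64 := by
  unfold PySem.Int.band
  split_ifs with h1 h2 h2
  · have h := Nat.and_le_right (n := a.toNat) (m := Int.toNat 63)
    have e : Int.toNat 63 = 63 := rfl
    constructor
    · exact Int.natCast_nonneg _
    · omega
  · omega
  · have h := Nat.and_le_left (n := Int.toNat 63) (m := (-a - 1).toNat)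
    have e : Int.toNat 63 = 63 := rfl
    constructor
    · exact Int.natCast_nonneg _
    · omega
  · omega

-- the two mask computations agree on all 64 payload values
theorem pv_mask_eq_nat : ∀ n : Nat, n < 64 → pvLoopMask (n : Int) = pvSpreadMask (n : Int) := by decide

theorem pv_mask_eq (p : Int) (h0 : 0 ≤ p) (h64 : p < 64) : pvLoopMask p = pvSpreadMask p := by
  have hp : p = ((p.toNat : Nat) : Int) := by omega
  rw [hp]
  exact pv_mask_eq_nat p.toNat (by omega)

-- ===== VERDICT (by name: the statement is the Claim_ definition above) =====
theorem expand_intron_to_mask_a12_spec : Claim_equal_expand_intron_to_mask_a12 := by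
  intro intron _
  unfold Spec_expand_intron_to_mask_a12 expand_intron_to_mask_a12 expand_intron_to_mask_a12_alt
  have hb := pv_band63_bounds (intron >>> 1)
  have h := pv_mask_eq (PySem.Int.band (intron >>> 1) 0x3F) hb.1 hb.2
  simpa [pvLoopMask, pvSpreadMask] using congrArg (fun m => (m, PySem.Int.bor (PySem.Int.band intron 1) (PySem.Int.band (intron >>> 6) 2))) h
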